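-- pv_equiv track=rewrite | github.com/hariszaf/metabolic_toy_model | scripts/MSEED_reactions.py | isTransport
-- ===== SOURCE A (Python) =====
-- def isTransport(rxn_cpds_array):
--     compartments_dict=dict()
--     for rgt in rxn_cpds_array:
--         compartments_dict[rgt['compartment']]=1
--     if(len(compartments_dict.keys())>1):
--         return 1
--     else:
--         return 0
-- ===== SOURCE B (Python) =====
-- def isTransport(rxn_cpds_array):
--     if not rxn_cpds_array:
--         return 0
--     ref = rxn_cpds_array[0]['compartment']
--     for rgt in rxn_cpds_array[1:]:
--         if rgt['compartment'] != ref: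
--             return 1
--     return 0
-- ===== Notes on version B (the rewrite author's own statement) =====
-- stated objective: simpler
-- what changed: B keeps only the first reagent's compartment as a scalar reference and short-circuits with 1 at the first differing compartment, instead of accumulating a dict of all compartments and counting its keys at the end.
import Mathlib
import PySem

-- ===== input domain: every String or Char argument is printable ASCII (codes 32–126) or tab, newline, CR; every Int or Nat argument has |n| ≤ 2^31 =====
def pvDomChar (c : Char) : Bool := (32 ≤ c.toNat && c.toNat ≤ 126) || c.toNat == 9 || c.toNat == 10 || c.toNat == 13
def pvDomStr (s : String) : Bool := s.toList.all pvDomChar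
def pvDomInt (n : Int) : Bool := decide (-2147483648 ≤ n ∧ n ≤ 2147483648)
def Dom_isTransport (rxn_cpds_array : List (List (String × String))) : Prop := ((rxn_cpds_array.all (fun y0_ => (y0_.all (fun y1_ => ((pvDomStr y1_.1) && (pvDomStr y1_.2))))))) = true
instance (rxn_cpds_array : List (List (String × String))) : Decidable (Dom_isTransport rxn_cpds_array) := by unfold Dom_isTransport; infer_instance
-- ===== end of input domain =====

-- B replaces A's dict of all compartments with a scalar reference compartment and an
-- early-exit scan; equivalence is proved on inputs where every reagent has a 'compartment' key.

-- ===== PORT A =====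
-- the for-loop of A: build compartments_dict; none = KeyError on rgt['compartment']
def isTransportLoop : List (List (String × String)) → PySem.Dict String Int →
    Option (PySem.Dict String Int)
  | [], d => some d
  | rgt :: rest, d =>
    match (PySem.Dict.mk rgt).get? "compartment" with
    | none => none            -- KeyError (excluded by Pre_)
    | some c => isTransportLoop rest (d.insert c 1)

def isTransport (rxn_cpds_array : List (List (String × String))) : Int :=
  match isTransportLoop rxn_cpds_array PySem.Dict.empty with
  | none => 0                 -- KeyError (excluded by Pre_)
  | some d => if d.keys.length > 1 then 1 else 0

-- ===== PORT B =====
-- the for-loop of B: compare each remaining compartment with the reference ref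
def isTransportAltLoop (ref : String) : List (List (String × String)) → Int
  | [] => 0
  | rgt :: rest =>
    match (PySem.Dict.mk rgt).get? "compartment" with
    | none => 0               -- KeyError (excluded by Pre_)
    | some c => if c ≠ ref then 1 else isTransportAltLoop ref rest

def isTransport_alt (rxn_cpds_array : List (List (String × String))) : Int :=
  match rxn_cpds_array with
  | [] => 0
  | rgt :: rest =>
    match (PySem.Dict.mk rgt).get? "compartment" with
    | none => 0               -- KeyError (excluded by Pre_)
    | some ref => isTransportAltLoop ref rest

-- ===== PRECONDITION & SPEC =====
-- Pre_: every reagent dict has a 'compartment' key; otherwise A (and B) raise KeyError.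
def Pre_isTransport (rxn_cpds_array : List (List (String × String))) : Prop :=
  (rxn_cpds_array.all (fun rgt => ((PySem.Dict.mk rgt).get? "compartment").isSome)) = true
instance (rxn_cpds_array : List (List (String × String))) : Decidable (Pre_isTransport rxn_cpds_array) := by unfold Pre_isTransport; infer_instance

def pvWitness_isTransport : (List (List (String × String))) :=
  [[("compartment", "c0")], [("compartment", "e0"), ("coefficient", "1")]]

def Spec_isTransport (rxn_cpds_array : List (List (String × String))) (out : Int) : Prop := out = isTransport_alt rxn_cpds_array
instance (rxn_cpds_array : List (List (String × String))) (out : Int) : Decidable (Spec_isTransport rxn_cpds_array out) := by unfold Spec_isTransport; infer_instance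

-- ===== CLAIM (what is proved, stated in full; the proofs are below) =====
def Claim_equal_isTransport : Prop := ∀ (rxn_cpds_array : List (List (String × String))), Dom_isTransport rxn_cpds_array → Pre_isTransport rxn_cpds_array → Spec_isTransport rxn_cpds_array (isTransport rxn_cpds_array)

-- ===== LEMMAS AND PROOFS =====

-- under Pre_, A's loop never hits the KeyError branch
lemma loop_some (rest : List (List (String × String))) (d : PySem.Dict String Int)
    (h : (rest.all (fun rgt => ((PySem.Dict.mk rgt).get? "compartment").isSome)) = true) :
    ∃ d', isTransportLoop rest d = some d' := by
  induction rest generalizing d with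
  | nil => exact ⟨d, rfl⟩
  | cons rgt rest ih =>
    simp only [List.all_cons, Bool.and_eq_true] at h
    obtain ⟨c, hc⟩ := Option.isSome_iff_exists.mp h.1
    simpa [isTransportLoop, hc] using ih (d.insert c 1) h.2

-- A's loop never shrinks the dict
lemma loop_size_mono (rest : List (List (String × String))) (d d' : PySem.Dict String Int)
    (h : isTransportLoop rest d = some d') : d.size ≤ d'.size := by
  induction rest generalizing d with
  | nil => simp only [isTransportLoop, Option.some.injEq] at h; exact h ▸ le_rfl
  | cons rgt rest ih =>
    simp only [isTransportLoop] at h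
    cases hg : (PySem.Dict.mk rgt).get? "compartment" with
    | none => simp [hg] at h
    | some c =>
      rw [hg] at h
      have := ih (d.insert c 1) h
      have hs := PySem.Dict.size_insert (d := d) (k := c) (v := (1 : Int))
      split_ifs at hs <;> omega

lemma single_insert_self (ref : String) :
    (PySem.Dict.mk [(ref, (1 : Int))]).insert ref 1 = PySem.Dict.mk [(ref, 1)] := by
  apply PySem.Dict.ext
  rw [PySem.Dict.items_insert_of_contains]
  · simp
  · simp [PySem.Dict.contains_mk]

-- the core invariant: starting from the one-key dict {ref: 1}, A's dict growth test equals B's scan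
lemma main_inv (rest : List (List (String × String))) (ref : String)
    (h : (rest.all (fun rgt => ((PySem.Dict.mk rgt).get? "compartment").isSome)) = true) :
    (match isTransportLoop rest (PySem.Dict.mk [(ref, 1)]) with
      | none => (0 : Int)
      | some d => if d.keys.length > 1 then 1 else 0) = isTransportAltLoop ref rest := by
  induction rest with
  | nil => simp [isTransportLoop, isTransportAltLoop, PySem.Dict.keys_mk]
  | cons rgt rest ih =>
    simp only [List.all_cons, Bool.and_eq_true] at h
    obtain ⟨c, hc⟩ := Option.isSome_iff_exists.mp h.1
    simp only [isTransportLoop, isTransportAltLoop, hc]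
    by_cases hcr : c = ref
    · subst hcr
      rw [single_insert_self]
      simpa using ih h.2
    · obtain ⟨d', hd'⟩ := loop_some rest ((PySem.Dict.mk [(ref, 1)]).insert c 1) h.2
      have hmono := loop_size_mono _ _ _ hd'
      have hs := PySem.Dict.size_insert (d := PySem.Dict.mk [(ref, (1 : Int))]) (k := c) (v := (1 : Int))
      have hnc : (PySem.Dict.mk [(ref, (1 : Int))]).contains c = false := by
        have hrc : ref ≠ c := fun e => hcr e.symm
        simp [PySem.Dict.contains_mk, hrc]
      rw [hnc] at hs
      rw [hs] at hmono
      simp only [Bool.false_eq_true, if_false, PySem.Dict.size, List.length_cons,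
        List.length_nil] at hmono
      simp only [hd']
      have : d'.keys.length > 1 := by
        simp only [PySem.Dict.keys, List.length_map] at hmono ⊢
        omega
      simp [this, hcr]

-- ===== VERDICT (by name: the statement is the Claim_ definition above) =====
theorem isTransport_spec : Claim_equal_isTransport := by
  intro xs _hdom hpre
  unfold Spec_isTransport isTransport isTransport_alt
  cases xs with
  | nil => simp [isTransportLoop, PySem.Dict.keys_empty]
  | cons rgt rest =>
    unfold Pre_isTransport at hpre
    simp only [List.all_cons, Bool.and_eq_true] at hpre
    obtain ⟨c, hc⟩ := Option.isSome_iff_exists.mp hpre.1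
    simp only [isTransportLoop, hc]
    have : PySem.Dict.empty.insert c (1 : Int) = PySem.Dict.mk [(c, 1)] := by
      apply PySem.Dict.ext
      rw [PySem.Dict.items_insert_of_not_contains] <;> simp [PySem.Dict.empty]
    rw [this]
    exact main_inv rest c hpre.2
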